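-- pv_equiv track=rewrite | github.com/chopsticks117/handball_competition_record_form_generator | ref_data.py | extract_referees
-- ===== SOURCE A (Python) =====
-- def bubble_sort(arr):
--     n = len(arr)
--     for i in range(n):
--         for j in range(0, n - i - 1):
--             if arr[j]['裁判編號'] > arr[j + 1]['裁判編號']:
--                 arr[j], arr[j + 1] = arr[j + 1], arr[j]
--     return arr
--
-- def extract_referees(content, referees):
--     referees_info = []
--     lines = content.split('\n')
--     for line in lines:
--         line = line.split()
--         for ref_num in referees:
--             ref_name = ""
--             for i in range(0, len(line), 2):
--                 if i+1 < len(line) and line[i] == ref_num: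
--                     ref_name = line[i+1]
--             if ref_num in line:
--                 referees_info.append({
--                     '裁判編號': ref_num,
--                     '裁判姓名': ref_name
--                 })
--     return bubble_sort(referees_info)
-- ===== SOURCE B (Python) =====
-- def extract_referees(content, referees):
--     referees_info = []
--     for raw_line in content.split('\n'):
--         tokens = raw_line.split()
--         # one pass over the tokens: index even-position tokens to their
--         # following token (last occurrence wins), and remember all tokens
--         pair_index = {}
--         for i in range(0, len(tokens) - 1, 2):
--             pair_index[tokens[i]] = tokens[i + 1]
--         token_set = set(tokens)
--         for ref_num in referees:
--             if ref_num in token_set: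
--                 referees_info.append({
--                     '裁判編號': ref_num,
--                     '裁判姓名': pair_index.get(ref_num, '')
--                 })
--     return sorted(referees_info, key=lambda r: r['裁判編號'])
-- ===== Notes on version B (the rewrite author's own statement) =====
-- stated objective: faster
-- what changed: Per line B builds the even-index token->next-token dict once and a token set, so the per-referee even-index rescan and list membership scan disappear, and the O(m^2) bubble sort is replaced by Python's stable sorted() on the key string.
import Mathlib
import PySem

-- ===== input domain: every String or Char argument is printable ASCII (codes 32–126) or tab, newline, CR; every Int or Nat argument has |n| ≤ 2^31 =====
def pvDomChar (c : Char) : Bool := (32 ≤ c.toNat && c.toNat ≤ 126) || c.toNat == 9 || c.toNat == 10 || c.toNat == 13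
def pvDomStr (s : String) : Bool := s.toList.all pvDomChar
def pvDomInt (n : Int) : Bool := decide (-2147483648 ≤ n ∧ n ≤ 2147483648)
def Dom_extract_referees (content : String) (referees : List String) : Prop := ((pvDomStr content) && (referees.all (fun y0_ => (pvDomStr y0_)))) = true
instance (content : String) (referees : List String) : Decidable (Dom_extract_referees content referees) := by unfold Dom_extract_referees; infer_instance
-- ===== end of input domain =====

-- B replaces A's per-referee even-index rescan and list scans by a per-line token->next-token
-- dict plus a token set, and replaces the bubble sort by Python's stable sorted(); objective: faster.

-- ===== PORT A =====
-- r['裁判編號'] : every appended dict carries this key, so the KeyError branch is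
-- unreachable and getD's default "" is never used (exact lookup, first match).
def pvRefKey (e : List (String × String)) : String := (PySem.Dict.mk e).getD "裁判編號" ""

-- one compare-swap step of the inner loop body ('arr[j], arr[j+1] = arr[j+1], arr[j]');
-- the wildcard branch is unreachable (0 ≤ j and j + 1 < len(arr) on every call)
def pvSwapStep (arr : List (List (String × String))) (j : Int) : List (List (String × String)) :=
  match PySem.List.pyGet? arr j, PySem.List.pyGet? arr (j + 1) with
  | some a, some b =>
      if pvRefKey b < pvRefKey a then
        PySem.List.pySetD (PySem.List.pySetD arr j b) (j + 1) a
      else arr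
  | _, _ => arr

def bubble_sort (arr : List (List (String × String))) : List (List (String × String)) :=
  (PySem.List.pyRange 0 arr.length 1).foldl
    (fun a i => (PySem.List.pyRange 0 ((arr.length : Int) - i - 1) 1).foldl pvSwapStep a) arr

-- content.split('\n') : sep ≠ "" so split? is always some; .getD [] only unwraps it.
-- line[i], line[i+1] via pyGetD: every index used lies in range (i ∈ range(0, len) and i+1 < len is tested first).
def extract_referees (content : String) (referees : List String) : List (List (String × String)) :=
  let lines := (PySem.Str.split? content "\n").getD []
  let referees_info := lines.foldl (fun acc line0 =>
    let line := PySem.Str.split₀ line0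
    referees.foldl (fun acc ref_num =>
      let ref_name := (PySem.List.pyRange 0 (line.length : Int) 2).foldl
        (fun name i =>
          if i + 1 < (line.length : Int) ∧ PySem.List.pyGetD line i "" = ref_num
          then PySem.List.pyGetD line (i + 1) "" else name) ""
      if ref_num ∈ line then
        acc ++ [[("裁判編號", ref_num), ("裁判姓名", ref_name)]]
      else acc) acc) []
  bubble_sort referees_info

-- ===== PORT B =====
-- tokens[i], tokens[i+1] via pyGetD: i ∈ range(0, len-1, 2) so both indices are in range.
def extract_referees_alt (content : String) (referees : List String) : List (List (String × String)) :=
  let referees_info := ((PySem.Str.split? content "\n").getD []).foldl (fun acc raw_line =>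
    let tokens := PySem.Str.split₀ raw_line
    let pair_index := (PySem.List.pyRange 0 ((tokens.length : Int) - 1) 2).foldl
      (fun d i => d.insert (PySem.List.pyGetD tokens i "") (PySem.List.pyGetD tokens (i + 1) ""))
      PySem.Dict.empty
    let token_set := PySem.Set.ofList tokens
    referees.foldl (fun acc ref_num =>
      if PySem.Set.contains token_set ref_num then
        acc ++ [[("裁判編號", ref_num), ("裁判姓名", pair_index.getD ref_num "")]]
      else acc) acc) []
  PySem.List.sorted referees_info pvRefKey

-- ===== PRECONDITION & SPEC =====
def Spec_extract_referees (content : String) (referees : List String) (out : List (List (String × String))) : Prop := out = extract_referees_alt content referees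
instance (content : String) (referees : List String) (out : List (List (String × String))) : Decidable (Spec_extract_referees content referees out) := by unfold Spec_extract_referees; infer_instance

-- ===== CLAIM (what is proved, stated in full; the proofs are below) =====
def Claim_equal_extract_referees : Prop := ∀ (content : String) (referees : List String), Dom_extract_referees content referees → Spec_extract_referees content referees (extract_referees content referees)

-- ===== LEMMAS AND PROOFS =====
def pvPass : List (List (String × String)) → List (List (String × String))
  | a :: b :: t => if pvRefKey b < pvRefKey a then b :: pvPass (a :: t) else a :: pvPass (b :: t)
  | l => l
termination_by l => l.length
decreasing_by all_goals simp
theorem pvPass_small (l : List (List (String × String)))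
    (h : ∀ (a b : List (String × String)) (t : List (List (String × String))), l = a :: b :: t → False) :
    pvPass l = l := by
  rcases l with _ | ⟨a, _ | ⟨b, t⟩⟩
  · simp [pvPass]
  · simp [pvPass]
  · exact absurd rfl (h a b t)

theorem pvGetAt {α : Type} (pre rest : List α) (x : α) :
    PySem.List.pyGet? (pre ++ x :: rest) (pre.length : Int) = some x := by
  rw [PySem.List.pyGet?_natCast]; simp

theorem pvSetAt {α : Type} (pre rest : List α) (x v : α) :
    PySem.List.pySetD (pre ++ x :: rest) (pre.length : Int) v = pre ++ v :: rest := by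
  rw [PySem.List.pySetD_natCast]; simp

-- one compare-swap at position pre.length
theorem pvStepAt (pre t post : List (List (String × String))) (a b : List (String × String)) :
    pvSwapStep (pre ++ a :: b :: t ++ post) (pre.length : Int)
    = pre ++ (if pvRefKey b < pvRefKey a then b :: a :: t else a :: b :: t) ++ post := by
  have h1 : PySem.List.pyGet? (pre ++ a :: b :: t ++ post) (pre.length : Int) = some a := by
    have := pvGetAt pre (b :: t ++ post) a
    simpa using this
  have h2 : PySem.List.pyGet? (pre ++ a :: b :: t ++ post) ((pre.length : Int) + 1) = some b := by
    have := pvGetAt (pre ++ [a]) (t ++ post) b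
    simp only [List.length_append, List.length_cons, List.length_nil] at this
    push_cast at this ⊢
    simpa [List.append_assoc] using this
  rw [pvSwapStep, h1, h2]
  by_cases h : pvRefKey b < pvRefKey a
  · simp only [h, if_true]
    have s1 : PySem.List.pySetD (pre ++ a :: b :: t ++ post) (pre.length : Int) b
        = pre ++ b :: b :: t ++ post := by
      have := pvSetAt pre (b :: t ++ post) a b; simpa [List.append_assoc] using this
    rw [s1]
    have s2 : PySem.List.pySetD (pre ++ b :: b :: t ++ post) ((pre.length : Int) + 1) a
        = pre ++ b :: a :: t ++ post := by
      have := pvSetAt (pre ++ [b]) (t ++ post) b a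
      simp only [List.length_append, List.length_cons, List.length_nil] at this
      push_cast at this ⊢
      simpa [List.append_assoc] using this
    rw [s2]
  · simp [h]

theorem pvRangeNil (a b : Int) (h : b ≤ a) : PySem.List.pyRange a b 1 = [] := by
  rw [PySem.List.pyRange_of_pos _ _ (by norm_num : (0:Int) < 1)]
  simp [not_lt.2 h]

theorem pvInnerGo :
    ∀ (seg pre post : List (List (String × String))),
      (PySem.List.pyRange (pre.length : Int) ((pre.length : Int) + (seg.length : Int) - 1) 1).foldl
        pvSwapStep (pre ++ seg ++ post)
      = pre ++ pvPass seg ++ post := by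
  intro seg
  induction seg using pvPass.induct with
  | case1 a b t h ih =>
      intro pre post
      have hlt : (pre.length : Int) < (pre.length : Int) + ((a :: b :: t).length : Int) - 1 := by
        simp; omega
      rw [PySem.List.pyRange_one_cons hlt, List.foldl_cons, pvStepAt pre t post a b]
      simp only [h, if_true]
      have := ih (pre ++ [b]) post
      simp only [List.length_append, List.length_cons, List.length_nil] at this ⊢
      have e1 : (pre ++ [b]) ++ (a :: t) ++ post = pre ++ b :: a :: t ++ post := by simp
      rw [e1] at this
      have e2 : ((pre.length : Int) + 1) = ((pre.length + 1 : Nat) : Int) := by push_cast; ring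
      rw [e2]
      have e3 : ((pre.length + 1 : Nat) : Int) + (t.length + 1 : Int) - 1
          = (pre.length : Int) + (t.length + 1 + 1) - 1 := by push_cast; ring
      rw [show pvPass (a :: b :: t) = b :: pvPass (a :: t) by rw [pvPass]; simp [h]]
      calc (PySem.List.pyRange (↑pre.length + 1) (↑pre.length + (↑t.length + 1 + 1) - 1) 1).foldl
              pvSwapStep (pre ++ b :: a :: t ++ post)
          = (pre ++ [b]) ++ pvPass (a :: t) ++ post := by
            rw [← e1]
            have := ih (pre ++ [b]) post
            simp only [List.length_append, List.length_cons, List.length_nil] at this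
            convert this using 3
            push_cast; ring
        _ = pre ++ b :: pvPass (a :: t) ++ post := by simp
  | case2 a b t h ih =>
      intro pre post
      have hlt : (pre.length : Int) < (pre.length : Int) + ((a :: b :: t).length : Int) - 1 := by
        simp; omega
      rw [PySem.List.pyRange_one_cons hlt, List.foldl_cons, pvStepAt pre t post a b]
      simp only [h, if_false]
      rw [show pvPass (a :: b :: t) = a :: pvPass (b :: t) by rw [pvPass]; simp [h]]
      calc (PySem.List.pyRange (↑pre.length + 1) (↑pre.length + ((a :: b :: t).length : Int) - 1) 1).foldl
              pvSwapStep (pre ++ a :: b :: t ++ post)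
          = (pre ++ [a]) ++ pvPass (b :: t) ++ post := by
            have := ih (pre ++ [a]) post
            simp only [List.length_append, List.length_cons, List.length_nil] at this
            have e1 : (pre ++ [a]) ++ (b :: t) ++ post = pre ++ a :: b :: t ++ post := by simp
            rw [e1] at this
            convert this using 3
            push_cast; simp; ring
        _ = pre ++ a :: pvPass (b :: t) ++ post := by simp
  | case3 seg hsmall =>
      intro pre post
      rw [pvPass_small seg hsmall]
      rcases seg with _ | ⟨x, _ | ⟨y, t⟩⟩
      · rw [pvRangeNil _ _ (by simp)]; rfl
      · rw [pvRangeNil _ _ (by simp)]; rfl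
      · exact absurd rfl (hsmall x y t)

theorem pvPass_length : ∀ l : List (List (String × String)), (pvPass l).length = l.length := by
  intro l
  induction l using pvPass.induct with
  | case1 a b t h ih => rw [pvPass]; simp only [h, if_true]; simp at ih ⊢; omega
  | case2 a b t h ih => rw [pvPass]; simp only [h, if_false]; simp at ih ⊢; omega
  | case3 l h => rw [pvPass_small l h]

def pvKF (k : String) (l : List (List (String × String))) : List (List (String × String)) :=
  l.filter (fun e => pvRefKey e == k)
theorem pvKF_nil (k : String) : pvKF k [] = [] := rfl
theorem pvKF_cons (k : String) (e : List (String × String)) (l : List (List (String × String))) :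
    pvKF k (e :: l) = if pvRefKey e = k then e :: pvKF k l else pvKF k l := by
  by_cases h : pvRefKey e = k <;> simp [pvKF, h]
theorem pvKF_append (k : String) (l₁ l₂ : List (List (String × String))) :
    pvKF k (l₁ ++ l₂) = pvKF k l₁ ++ pvKF k l₂ := by
  simp [pvKF, List.filter_append]
theorem pvPass_filter (k : String) :
    ∀ l, pvKF k (pvPass l) = pvKF k l := by
  intro l
  induction l using pvPass.induct with
  | case1 a b t h ih =>
      rw [pvPass]
      simp only [h, if_true]
      rw [pvKF_cons, ih]
      by_cases hb : pvRefKey b = k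
      · have ha : ¬ pvRefKey a = k := by intro ha; rw [ha, ← hb] at h; exact lt_irrefl _ h
        simp [pvKF_cons, hb, ha]
      · simp [pvKF_cons, hb]
  | case2 a b t h ih =>
      rw [pvPass]
      simp only [h, if_false]
      rw [pvKF_cons, ih, pvKF_cons]
      by_cases ha : pvRefKey a = k <;> simp [pvKF_cons, ha]
  | case3 l h => rw [pvPass_small l h]
theorem pvPass_mem (x : List (String × String)) :
    ∀ l, x ∈ pvPass l ↔ x ∈ l := by
  intro l
  induction l using pvPass.induct with
  | case1 a b t h ih => rw [pvPass]; simp only [h, if_true]; simp [ih]; tauto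
  | case2 a b t h ih => rw [pvPass]; simp only [h, if_false]; simp [ih]
  | case3 l h => rw [pvPass_small l h]
theorem pvPass_max :
    ∀ l, l ≠ [] → ∃ l' x, pvPass l = l' ++ [x] ∧ ∀ y ∈ l, pvRefKey y ≤ pvRefKey x := by
  intro l
  induction l using pvPass.induct with
  | case1 a b t h ih =>
      intro _
      obtain ⟨l', x, hx, hmax⟩ := ih (by simp)
      refine ⟨b :: l', x, by rw [pvPass]; simp [h, hx], ?_⟩
      intro y hy
      simp only [List.mem_cons] at hy
      rcases hy with rfl | rfl | hy
      · exact hmax _ (by simp)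
      · exact le_of_lt (lt_of_lt_of_le h (hmax a (by simp)))
      · exact hmax _ (by simp [hy])
  | case2 a b t h ih =>
      intro _
      obtain ⟨l', x, hx, hmax⟩ := ih (by simp)
      refine ⟨a :: l', x, by rw [pvPass]; simp [h, hx], ?_⟩
      intro y hy
      simp only [List.mem_cons] at hy
      rcases hy with rfl | rfl | hy
      · exact le_trans (not_lt.1 h) (hmax b (by simp))
      · exact hmax _ (by simp)
      · exact hmax _ (by simp [hy])
  | case3 l h =>
      intro hne
      rcases l with _ | ⟨x, _ | ⟨b, t⟩⟩
      · exact absurd rfl hne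
      · exact ⟨[], x, by simp [pvPass], by simp⟩
      · exact absurd rfl (h x b t)


def pvInv (L a : List (List (String × String))) (m : Nat) : Prop :=
  a.length = L.length ∧ (∀ k, pvKF k a = pvKF k L) ∧
  ∃ p s, a = p ++ s ∧ p.length ≤ m ∧
    s.Pairwise (fun x y => pvRefKey x ≤ pvRefKey y) ∧
    ∀ x ∈ p, ∀ y ∈ s, pvRefKey x ≤ pvRefKey y

theorem pvPairwise_take_drop {α : Type} {R : α → α → Prop} {l : List α} (h : l.Pairwise R) (d : Nat) :
    ∀ x ∈ l.take d, ∀ y ∈ l.drop d, R x y := by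
  have := (List.pairwise_append (l₁ := l.take d) (l₂ := l.drop d)).1 (by rwa [List.take_append_drop])
  exact this.2.2

theorem pvOuterStep (L a : List (List (String × String))) (τ : Nat) (hτ : 1 ≤ τ)
    (hτn : τ ≤ a.length) (inv : pvInv L a τ) :
    pvInv L ((PySem.List.pyRange 0 ((τ : Int) - 1) 1).foldl pvSwapStep a) (τ - 1) := by
  obtain ⟨hlen, hfil, p, s, rfl, hp, hs, hdom⟩ := inv
  set A := p ++ s with hA
  set seg := A.take τ with hseg
  set post := A.drop τ with hpost
  have hsegA : A = seg ++ post := (List.take_append_drop τ A).symm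
  have hseglen : seg.length = τ := by
    simp [hseg, List.length_take]; omega
  have hrange : ((0:Int) = (([] : List (List (String × String))).length : Int)) := by simp
  have hgo := pvInnerGo seg [] post
  simp only [List.length_nil, Nat.cast_zero, List.nil_append, zero_add] at hgo
  have hfold : (PySem.List.pyRange 0 ((τ : Int) - 1) 1).foldl pvSwapStep A
      = pvPass seg ++ post := by
    rw [hsegA]
    have : ((seg.length : Int) - 1) = ((τ:Int) - 1) := by rw [hseglen]
    rw [← this]
    exact hgo
  rw [hfold]
  -- decompose pass seg
  have hsegne : seg ≠ [] := by
    intro hnil; rw [hnil] at hseglen; simp at hseglen; omega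
  obtain ⟨l', x, hpx, hmax⟩ := pvPass_max seg hsegne
  have hmemseg : ∀ y ∈ l', y ∈ seg := by
    intro y hy
    have : y ∈ pvPass seg := by rw [hpx]; simp [hy]
    exact (pvPass_mem y seg).1 this
  have hxseg : x ∈ seg := by
    have : x ∈ pvPass seg := by rw [hpx]; simp
    exact (pvPass_mem x seg).1 this
  -- any element of seg is ≤ every element of post
  have hsegpost : ∀ y ∈ seg, ∀ z ∈ post, pvRefKey y ≤ pvRefKey z := by
    intro y hy z hz
    -- seg = p ++ s.take (τ - p.length), post = s.drop (τ - p.length)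
    have hple : p.length ≤ τ := hp
    have hsegsplit : seg = p ++ s.take (τ - p.length) := by
      rw [hseg, hA, List.take_append]; simp [List.take_of_length_le hple]
    have hpostsplit : post = s.drop (τ - p.length) := by
      rw [hpost, hA, List.drop_append]; simp [List.drop_of_length_le hple]
    rw [hsegsplit] at hy
    rw [hpostsplit] at hz
    rcases List.mem_append.1 hy with hyp | hyt
    · exact hdom y hyp z (List.mem_of_mem_drop hz)
    · exact pvPairwise_take_drop hs _ y hyt z hz
  constructor
  · have h1 : (pvPass seg).length = τ := by rw [pvPass_length, hseglen]
    have h2 : post.length = A.length - τ := by rw [hpost, List.length_drop]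
    simp only [List.length_append, h1, h2, ← hlen]
    omega
  constructor
  · intro k
    rw [pvKF_append, pvPass_filter, ← pvKF_append, ← hsegA]
    exact hfil k
  · refine ⟨l', x :: post, by rw [hpx]; simp, ?_, ?_, ?_⟩
    · have : l'.length + 1 = τ := by
        have := pvPass_length seg
        rw [hpx] at this; simp at this; omega
      omega
    · refine List.pairwise_cons.2 ⟨?_, ?_⟩
      · intro z hz; exact hsegpost x hxseg z hz
      · have hple : p.length ≤ τ := hp
        have hpostsplit : post = s.drop (τ - p.length) := by
          rw [hpost, hA, List.drop_append]; simp [List.drop_of_length_le hple]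
        rw [hpostsplit]
        exact hs.drop
    · intro y hy z hz
      rcases List.mem_cons.1 hz with rfl | hz
      · exact hmax y (hmemseg y hy)
      · exact hsegpost y (hmemseg y hy) z hz


theorem pvOuterGo (L : List (List (String × String))) :
    ∀ (c : Nat) (i : Int) (a : List (List (String × String))),
      i = (L.length : Int) - c → c ≤ L.length → pvInv L a c →
      ((PySem.List.pyRange i (L.length : Int) 1).foldl
        (fun a i => (PySem.List.pyRange 0 ((L.length : Int) - i - 1) 1).foldl pvSwapStep a) a).Pairwise
          (fun x y => pvRefKey x ≤ pvRefKey y) ∧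
      ∀ k, pvKF k ((PySem.List.pyRange i (L.length : Int) 1).foldl
        (fun a i => (PySem.List.pyRange 0 ((L.length : Int) - i - 1) 1).foldl pvSwapStep a) a) = pvKF k L := by
  intro c
  induction c with
  | zero =>
      intro i a hi hc inv
      rw [hi]
      simp only [Nat.cast_zero, sub_zero]
      rw [pvRangeNil _ _ (le_refl _)]
      obtain ⟨hlen, hfil, p, s, rfl, hp, hs, hdom⟩ := inv
      have : p = [] := List.eq_nil_of_length_eq_zero (Nat.le_zero.1 hp)
      subst this
      refine ⟨?_, ?_⟩
      · simpa using hs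
      · simpa using hfil
  | succ c ih =>
      intro i a hi hc inv
      have hin : i < (L.length : Int) := by omega
      rw [PySem.List.pyRange_one_cons hin, List.foldl_cons]
      have hτi : (L.length : Int) - i - 1 = ((c + 1 : Nat) : Int) - 1 := by push_cast; omega
      rw [hτi]
      have hc' : ((c + 1 : Nat) : Int) - 1 = (c : Int) := by push_cast; ring
      rw [hc']
      have hstep := pvOuterStep L a (c + 1) (by omega)
        (by
          have hlen : a.length = L.length := inv.1
          omega) inv
      have hstep' : pvInv L (List.foldl pvSwapStep a (PySem.List.pyRange 0 (c:Int))) c := by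
        have hc'' : ((c + 1 : Nat) : Int) - 1 = (c : Int) := by push_cast; ring
        rw [hc''] at hstep
        simpa using hstep
      exact ih (i + 1) _ (by push_cast; omega) (by omega) hstep'

theorem pvBubble_pairwise (l : List (List (String × String))) :
    (bubble_sort l).Pairwise (fun a b => pvRefKey a ≤ pvRefKey b) := by
  have := pvOuterGo l l.length 0 l (by simp) (le_refl _)
    ⟨rfl, fun k => rfl, l, [], by simp, le_refl _, List.Pairwise.nil, by simp⟩
  unfold bubble_sort
  exact this.1

theorem pvBubble_filter (l : List (List (String × String))) (k : String) :
    pvKF k (bubble_sort l) = pvKF k l := by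
  have := pvOuterGo l l.length 0 l (by simp) (le_refl _)
    ⟨rfl, fun k => rfl, l, [], by simp, le_refl _, List.Pairwise.nil, by simp⟩
  unfold bubble_sort
  exact this.2 k

theorem pvInsertBy_filter (k : String) (x : List (String × String)) :
    ∀ ys : List (List (String × String)),
      ys.Pairwise (fun a b => pvRefKey a ≤ pvRefKey b) →
      pvKF k (PySem.List.insertBy (fun a b => decide (pvRefKey a < pvRefKey b)) x ys)
      = if pvRefKey x = k then pvKF k ys ++ [x] else pvKF k ys := by
  intro ys
  induction ys with
  | nil =>
      intro _
      by_cases hx : pvRefKey x = k <;> simp [PySem.List.insertBy, pvKF, hx]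
  | cons y t ih =>
      intro hp
      rw [PySem.List.insertBy]
      by_cases hb : pvRefKey x < pvRefKey y
      · rw [if_pos (by simp [hb])]
        by_cases hx : pvRefKey x = k
        · have hnone : pvKF k (y :: t) = [] := by
            rw [List.eq_nil_iff_forall_not_mem]
            intro z hz
            have hzk : pvRefKey z = k := by
              simp [pvKF, List.mem_filter] at hz; exact hz.2
            have : pvRefKey y ≤ pvRefKey z := by
              rcases List.mem_cons.1 (List.mem_filter.1 hz).1 with rfl | hzt
              · exact le_refl _
              · exact (List.pairwise_cons.1 hp).1 z hzt
            rw [hzk, ← hx] at this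
            exact absurd hb (not_lt.2 this)
          rw [if_pos hx, pvKF_cons, if_pos hx, hnone]
          simp
        · rw [if_neg hx, pvKF_cons, if_neg hx]
      · rw [if_neg (by simp [hb])]
        have ht := (List.pairwise_cons.1 hp).2
        rw [pvKF_cons, ih ht, pvKF_cons]
        by_cases hy : pvRefKey y = k <;> by_cases hx : pvRefKey x = k <;>
          simp [hy, hx]

theorem pvSorted_filter (l : List (List (String × String))) (k : String) :
    pvKF k (PySem.List.sorted l pvRefKey) = pvKF k l := by
  induction l using List.reverseRecOn with
  | nil => simp [PySem.List.sorted_eq_foldl_insertBy, pvKF]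
  | append_singleton xs x ih =>
      have hs : PySem.List.sorted (xs ++ [x]) pvRefKey
          = PySem.List.insertBy (fun a b => decide (pvRefKey a < pvRefKey b)) x
              (PySem.List.sorted xs pvRefKey) := by
        rw [PySem.List.sorted_eq_foldl_insertBy, PySem.List.sorted_eq_foldl_insertBy,
          List.foldl_append, List.foldl_cons, List.foldl_nil]
      rw [hs, pvInsertBy_filter k x _ (PySem.List.sorted_pairwise xs pvRefKey), pvKF_append, ih]
      by_cases hx : pvRefKey x = k <;> simp [pvKF, hx]

theorem pvSortedUnique :
    ∀ (S₁ S₂ : List (List (String × String))),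
      S₁.Pairwise (fun a b => pvRefKey a ≤ pvRefKey b) →
      S₂.Pairwise (fun a b => pvRefKey a ≤ pvRefKey b) →
      (∀ k, pvKF k S₁ = pvKF k S₂) → S₁ = S₂ := by
  intro S₁
  induction S₁ with
  | nil =>
      intro S₂ _ _ hf
      cases S₂ with
      | nil => rfl
      | cons y t =>
          have := hf (pvRefKey y)
          rw [pvKF_nil, pvKF_cons, if_pos rfl] at this
          exact absurd this.symm (by simp)
  | cons x t₁ ih =>
      intro S₂ h₁ h₂ hf
      cases S₂ with
      | nil =>
          have := hf (pvRefKey x)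
          rw [pvKF_nil, pvKF_cons, if_pos rfl] at this
          exact absurd this (by simp)
      | cons y t₂ =>
          have hxy : x = y := by
            by_cases hk : pvRefKey x = pvRefKey y
            · have := hf (pvRefKey x)
              rw [pvKF_cons, if_pos rfl, pvKF_cons, if_pos hk.symm] at this
              exact (List.cons.injEq _ _ _ _ ▸ this).1
            · -- key x ≠ key y: derive a contradiction from minimality on both sides
              exfalso
              have hx2 : x ∈ y :: t₂ := by
                have := hf (pvRefKey x)
                rw [pvKF_cons, if_pos rfl] at this
                have : x ∈ pvKF (pvRefKey x) (y :: t₂) := by rw [← this]; simp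
                exact (List.mem_filter.1 this).1
              have hy1 : y ∈ x :: t₁ := by
                have := hf (pvRefKey y)
                rw [pvKF_cons (l := t₂), if_pos rfl] at this
                have : y ∈ pvKF (pvRefKey y) (x :: t₁) := by rw [this]; simp
                exact (List.mem_filter.1 this).1
              have hyx : pvRefKey y ≤ pvRefKey x := by
                rcases List.mem_cons.1 hx2 with rfl | hx2
                · exact le_refl _
                · exact (List.pairwise_cons.1 h₂).1 x hx2
              have hxyle : pvRefKey x ≤ pvRefKey y := by
                rcases List.mem_cons.1 hy1 with rfl | hy1
                · exact le_refl _
                · exact (List.pairwise_cons.1 h₁).1 y hy1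
              exact hk (le_antisymm hxyle hyx)
          subst hxy
          have htf : ∀ k, pvKF k t₁ = pvKF k t₂ := by
            intro k
            have := hf k
            rw [pvKF_cons, pvKF_cons] at this
            by_cases hk : pvRefKey x = k
            · rw [if_pos hk, if_pos hk] at this
              exact (List.cons.injEq _ _ _ _ ▸ this).2
            · rwa [if_neg hk, if_neg hk] at this
          rw [ih t₂ (List.pairwise_cons.1 h₁).2 (List.pairwise_cons.1 h₂).2 htf]

theorem pvRange2_cons (b : Int) (hb : 1 ≤ b) :
    PySem.List.pyRange 0 b 2 = 0 :: (PySem.List.pyRange 0 (b - 2) 2).map (· + 2) := by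
  rw [PySem.List.pyRange_of_pos _ _ (by norm_num : (0:Int) < 2),
      PySem.List.pyRange_of_pos _ _ (by norm_num : (0:Int) < 2)]
  rw [show (if 0 < b then ((b - 0 + 2 - 1) / 2).toNat else 0)
      = (if 0 < b - 2 then ((b - 2 - 0 + 2 - 1) / 2).toNat else 0) + 1 from by split_ifs <;> omega]
  rw [List.range_succ_eq_map]
  simp [List.map_map, Function.comp]
  intro a _
  ring

theorem pvGetD_cons_succ {α : Type} (x : α) (xs : List α) (i : Int) (d : α) (h : 0 ≤ i) :
    PySem.List.pyGetD (x :: xs) (i + 1) d = PySem.List.pyGetD xs i d := by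
  obtain ⟨n, rfl⟩ := Int.eq_ofNat_of_zero_le h
  rw [show ((n : Int) + 1) = ((n + 1 : Nat) : Int) by push_cast; ring,
     PySem.List.pyGetD_natCast, PySem.List.pyGetD_natCast]
  simp

theorem pvRange2_nonneg (b i : Int) (h : i ∈ PySem.List.pyRange 0 b 2) : 0 ≤ i := by
  have := (PySem.List.mem_pyRange_iff_of_pos (by norm_num : (0:Int) < 2) i).1 h
  omega

theorem pvRange2Nil (b : Int) (h : b ≤ 0) : PySem.List.pyRange 0 b 2 = [] := by
  rw [PySem.List.pyRange_of_pos _ _ (by norm_num : (0:Int) < 2)]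
  simp [not_lt.2 h]

def pvScanSpec (r : String) : List String → String → String
  | a :: b :: t, cur => pvScanSpec r t (if a = r then b else cur)
  | _, cur => cur

theorem pvScanEq (r : String) (tokens : List String) (cur : String) :
      (PySem.List.pyRange 0 (tokens.length : Int) 2).foldl
        (fun name i =>
          if i + 1 < (tokens.length : Int) ∧ PySem.List.pyGetD tokens i "" = r
          then PySem.List.pyGetD tokens (i + 1) "" else name) cur
      = pvScanSpec r tokens cur := by
  induction tokens, cur using pvScanSpec.induct (r := r) with
  | case1 a b t cur ih =>
      have hlen : ((a :: b :: t).length : Int) = (t.length : Int) + 2 := by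
        simp [List.length_cons]; push_cast; ring
      rw [hlen, pvRange2_cons _ (by omega), List.foldl_cons, List.foldl_map]
      have h0 : PySem.List.pyGetD (a :: b :: t) 0 "" = a := by
        rw [show (0:Int) = ((0:Nat):Int) by norm_num, PySem.List.pyGetD_natCast]; rfl
      have h1 : PySem.List.pyGetD (a :: b :: t) (0 + 1) "" = b := by
        rw [show ((0:Int)+1) = ((1:Nat):Int) by norm_num, PySem.List.pyGetD_natCast]; rfl
      have hinit : (if (0:Int) + 1 < (t.length : Int) + 2 ∧ PySem.List.pyGetD (a :: b :: t) 0 "" = r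
          then PySem.List.pyGetD (a :: b :: t) (0 + 1) "" else cur) = (if a = r then b else cur) := by
        rw [h0, h1]
        have h2 : ((0:Int) + 1 < (t.length : Int) + 2) := by omega
        simp only [h2, true_and]
      rw [hinit]
      rw [PySem.List.foldl_congr_mem _ _
        (fun name i =>
          if i + 1 < (t.length : Int) ∧ PySem.List.pyGetD t i "" = r
          then PySem.List.pyGetD t (i + 1) "" else name) _
        (by
          intro acc i hi
          beta_reduce
          have hnn : 0 ≤ i := pvRange2_nonneg _ _ (by
            rw [show (t.length : Int) + 2 - 2 = (t.length : Int) by ring] at hi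
            exact hi)
          have g1 : PySem.List.pyGetD (a :: b :: t) (i + 2) "" = PySem.List.pyGetD t i "" := by
            rw [show i + 2 = (i + 1) + 1 by ring, pvGetD_cons_succ _ _ _ _ (by omega),
               pvGetD_cons_succ _ _ _ _ hnn]
          have g2 : PySem.List.pyGetD (a :: b :: t) (i + 2 + 1) "" = PySem.List.pyGetD t (i + 1) "" := by
            rw [pvGetD_cons_succ _ _ (i + 2) _ (by omega),
                show i + 2 = (i + 1) + 1 by ring,
                pvGetD_cons_succ _ _ (i + 1) _ (by omega)]
          rw [g1, g2]
          have hcond : (i + 2 + 1 < (t.length : Int) + 2) ↔ (i + 1 < (t.length : Int)) := by omega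
          by_cases hc : i + 1 < (t.length : Int) ∧ PySem.List.pyGetD t i "" = r
          · rw [if_pos ⟨hcond.2 hc.1, hc.2⟩, if_pos hc]
          · rw [if_neg (by rw [hcond]; exact hc), if_neg hc])]
      rw [show (t.length : Int) + 2 - 2 = (t.length : Int) by ring]
      rw [ih, pvScanSpec]
  | case2 tokens cur h =>
      rcases tokens with _ | ⟨x, _ | ⟨y, t⟩⟩
      · rw [pvRange2Nil _ (by simp), List.foldl_nil, pvScanSpec]
        exact h
      · rw [show (([x] : List String).length : Int) = 1 by simp,
            pvRange2_cons _ (by norm_num), pvRange2Nil _ (by norm_num), List.map_nil,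
            List.foldl_cons, List.foldl_nil]
        rw [if_neg (by simp)]
        rw [pvScanSpec]
        exact h
      · exact absurd rfl (h x y t)

def pvTwoStep : List String → Unit
  | _ :: _ :: t => pvTwoStep t
  | _ => ()

theorem pvDictEq (r : String) (tokens : List String) :
    ∀ d : PySem.Dict String String,
      ((PySem.List.pyRange 0 ((tokens.length : Int) - 1) 2).foldl
        (fun d i => d.insert (PySem.List.pyGetD tokens i "") (PySem.List.pyGetD tokens (i + 1) "")) d).getD r ""
      = pvScanSpec r tokens (d.getD r "") := by
  induction tokens using pvTwoStep.induct with
  | case1 a b t ih =>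
      intro d
      have hlen : (((a :: b :: t).length : Int)) - 1 = (t.length : Int) + 1 := by
        simp [List.length_cons]
      rw [hlen, pvRange2_cons _ (by omega), List.foldl_cons, List.foldl_map]
      have h0 : PySem.List.pyGetD (a :: b :: t) 0 "" = a := by
        rw [show (0:Int) = ((0:Nat):Int) by norm_num, PySem.List.pyGetD_natCast]; rfl
      have h1 : PySem.List.pyGetD (a :: b :: t) (0 + 1) "" = b := by
        rw [show ((0:Int)+1) = ((1:Nat):Int) by norm_num, PySem.List.pyGetD_natCast]; rfl
      rw [h0, h1]
      rw [PySem.List.foldl_congr_mem _ _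
        (fun d i => d.insert (PySem.List.pyGetD t i "") (PySem.List.pyGetD t (i + 1) "")) _
        (by
          intro acc i hi
          beta_reduce
          have hnn : 0 ≤ i := pvRange2_nonneg _ _ (by
            rw [show (t.length : Int) + 1 - 2 = (t.length : Int) - 1 by ring] at hi
            exact hi)
          have g1 : PySem.List.pyGetD (a :: b :: t) (i + 2) "" = PySem.List.pyGetD t i "" := by
            rw [show i + 2 = (i + 1) + 1 by ring, pvGetD_cons_succ _ _ _ _ (by omega),
               pvGetD_cons_succ _ _ _ _ hnn]
          have g2 : PySem.List.pyGetD (a :: b :: t) (i + 2 + 1) "" = PySem.List.pyGetD t (i + 1) "" := by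
            rw [pvGetD_cons_succ _ _ (i + 2) _ (by omega),
                show i + 2 = (i + 1) + 1 by ring,
                pvGetD_cons_succ _ _ (i + 1) _ (by omega)]
          rw [g1, g2])]
      rw [show (t.length : Int) + 1 - 2 = (t.length : Int) - 1 by ring]
      rw [ih (d.insert a b), pvScanSpec]
      congr 1
      rw [PySem.Dict.getD_insert]
      by_cases har : a = r
      · rw [if_pos har, if_pos (by rw [har])]
      · rw [if_neg har, if_neg (by intro hra; exact har hra.symm)]
  | case2 tokens h =>
      intro d
      rcases tokens with _ | ⟨x, _ | ⟨y, t⟩⟩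
      · rw [pvRange2Nil _ (by simp), List.foldl_nil, pvScanSpec]
        exact h
      · rw [pvRange2Nil _ (by simp), List.foldl_nil, pvScanSpec]
        exact h
      · exact absurd rfl (h x y t)

theorem pvLineEq (tokens : List String) (referees : List String) :
    ∀ acc : List (List (String × String)),
      referees.foldl (fun acc ref_num =>
        let ref_name := (PySem.List.pyRange 0 (tokens.length : Int) 2).foldl
          (fun name i =>
            if i + 1 < (tokens.length : Int) ∧ PySem.List.pyGetD tokens i "" = ref_num
            then PySem.List.pyGetD tokens (i + 1) "" else name) ""
        if ref_num ∈ tokens then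
          acc ++ [[("裁判編號", ref_num), ("裁判姓名", ref_name)]]
        else acc) acc
      = referees.foldl (fun acc ref_num =>
        if PySem.Set.contains (PySem.Set.ofList tokens) ref_num then
          acc ++ [[("裁判編號", ref_num),
            ("裁判姓名", ((PySem.List.pyRange 0 ((tokens.length : Int) - 1) 2).foldl
              (fun d i => d.insert (PySem.List.pyGetD tokens i "") (PySem.List.pyGetD tokens (i + 1) ""))
              PySem.Dict.empty).getD ref_num "")]]
        else acc) acc := by
  intro acc
  apply PySem.List.foldl_congr_mem
  intro a ref _
  beta_reduce
  have hname : (PySem.List.pyRange 0 (tokens.length : Int) 2).foldl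
      (fun name i =>
        if i + 1 < (tokens.length : Int) ∧ PySem.List.pyGetD tokens i "" = ref
        then PySem.List.pyGetD tokens (i + 1) "" else name) ""
      = ((PySem.List.pyRange 0 ((tokens.length : Int) - 1) 2).foldl
          (fun d i => d.insert (PySem.List.pyGetD tokens i "") (PySem.List.pyGetD tokens (i + 1) ""))
          PySem.Dict.empty).getD ref "" := by
    rw [pvScanEq, pvDictEq, PySem.Dict.getD_empty]
  have hmem : (PySem.Set.contains (PySem.Set.ofList tokens) ref = true) ↔ ref ∈ tokens := by
    simp [PySem.Set.contains]
  by_cases hm : ref ∈ tokens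
  · rw [if_pos hm, if_pos (hmem.2 hm), hname]
  · rw [if_neg hm, if_neg (by rw [hmem]; exact hm)]

-- the two pre-sort lists coincide
theorem pvPrelist (lines : List String) (referees : List String) :
    ∀ acc : List (List (String × String)),
    lines.foldl (fun acc line0 =>
      let line := PySem.Str.split₀ line0
      referees.foldl (fun acc ref_num =>
        let ref_name := (PySem.List.pyRange 0 (line.length : Int) 2).foldl
          (fun name i =>
            if i + 1 < (line.length : Int) ∧ PySem.List.pyGetD line i "" = ref_num
            then PySem.List.pyGetD line (i + 1) "" else name) ""
        if ref_num ∈ line then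
          acc ++ [[("裁判編號", ref_num), ("裁判姓名", ref_name)]]
        else acc) acc) acc
    = lines.foldl (fun acc raw_line =>
      let tokens := PySem.Str.split₀ raw_line
      let pair_index := (PySem.List.pyRange 0 ((tokens.length : Int) - 1) 2).foldl
        (fun d i => d.insert (PySem.List.pyGetD tokens i "") (PySem.List.pyGetD tokens (i + 1) ""))
        PySem.Dict.empty
      let token_set := PySem.Set.ofList tokens
      referees.foldl (fun acc ref_num =>
        if PySem.Set.contains token_set ref_num then
          acc ++ [[("裁判編號", ref_num), ("裁判姓名", pair_index.getD ref_num "")]]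
        else acc) acc) acc := by
  intro acc
  apply PySem.List.foldl_congr_mem
  intro a line0 _
  exact pvLineEq (PySem.Str.split₀ line0) referees a

-- ===== VERDICT (by name: the statement is the Claim_ definition above) =====
theorem extract_referees_spec : Claim_equal_extract_referees := by
  intro content referees _
  unfold Spec_extract_referees extract_referees extract_referees_alt
  refine pvSortedUnique _ _ (pvBubble_pairwise _) (PySem.List.sorted_pairwise _ _) (fun k => ?_)
  rw [pvBubble_filter, pvSorted_filter]
  exact congrArg (pvKF k) (pvPrelist ((PySem.Str.split? content "\n").getD []) referees [])
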